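-- pv_equiv track=rewrite | github.com/crayola/AoC2023 | 11/11.py | distance
-- ===== SOURCE A (Python) =====
-- def distance(pos1, pos2, expansion_rows, expansion_columns, expansion_factor):
--     """
--     Calculates the Manhattan distance between two points, taking into account
--     additional "expansion" rows and columns with a given factor. It includes the
--     distance between the points and the expanded areas, weighted by the expansion
--     factor.
--
--     Args:
--         pos1 (Tuple[int, int]): Used to represent the coordinates of a position
--             in a grid, where the first element is the row number and the second
--             element is the column number.
--         pos2 (Tuple[int, int]): Represented as a pair of coordinates in a
--             two-dimensional space, where the first element is the row position and
--             the second element is the column position.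
--         expansion_rows (List[int]): Representing a list of rows where expansions
--             occur, likely affecting the distance calculation.
--         expansion_columns (List[int]): Used to calculate the number of columns
--             between two positions that are part of the grid expansion. It contains
--             indices of the columns that are expanded.
--         expansion_factor (float): Used to calculate a weighted penalty for traversing
--             through expanded rows and columns.
--
--     Returns:
--         int: A weighted Manhattan distance between two points, taking into account
--         rows and columns with expansions.
--
--     """
--     row_expansions_between = len(
--         [1 for x in range(pos1[0], pos2[0]) if x in expansion_rows]
--     )
--     column_expansions_between = len(
--         [
--             1
--             for x in range(min(pos1[1], pos2[1]), max(pos1[1], pos2[1]))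
--             if x in expansion_columns
--         ]
--     )
--     expansions_between = row_expansions_between + column_expansions_between
--     return (
--         abs(pos1[0] - pos2[0])
--         + abs(pos1[1] - pos2[1])
--         + (expansion_factor - 1) * expansions_between
--     )
-- ===== SOURCE B (Python) =====
-- def distance(pos1, pos2, expansion_rows, expansion_columns, expansion_factor):
--     r1, c1 = pos1[0], pos1[1]
--     r2, c2 = pos2[0], pos2[1]
--     # one pass over each expansion list instead of scanning it for every
--     # coordinate in the range; a set deduplicates repeated expansion entries
--     rows_between = len({e for e in expansion_rows if r1 <= e < r2})
--     lo, hi = (c1, c2) if c1 <= c2 else (c2, c1)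
--     cols_between = len({e for e in expansion_columns if lo <= e < hi})
--     return (abs(r1 - r2) + abs(c1 - c2)
--             + (expansion_factor - 1) * (rows_between + cols_between))
-- ===== Notes on version B (the rewrite author's own statement) =====
-- stated objective: faster
-- what changed: Instead of walking every coordinate of the (possibly huge) row/column ranges and scanning the expansion list for each, B makes one pass over each expansion list, counting (deduplicated) entries that fall inside the interval, so the cost no longer depends on the coordinate distance D.
import Mathlib
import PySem

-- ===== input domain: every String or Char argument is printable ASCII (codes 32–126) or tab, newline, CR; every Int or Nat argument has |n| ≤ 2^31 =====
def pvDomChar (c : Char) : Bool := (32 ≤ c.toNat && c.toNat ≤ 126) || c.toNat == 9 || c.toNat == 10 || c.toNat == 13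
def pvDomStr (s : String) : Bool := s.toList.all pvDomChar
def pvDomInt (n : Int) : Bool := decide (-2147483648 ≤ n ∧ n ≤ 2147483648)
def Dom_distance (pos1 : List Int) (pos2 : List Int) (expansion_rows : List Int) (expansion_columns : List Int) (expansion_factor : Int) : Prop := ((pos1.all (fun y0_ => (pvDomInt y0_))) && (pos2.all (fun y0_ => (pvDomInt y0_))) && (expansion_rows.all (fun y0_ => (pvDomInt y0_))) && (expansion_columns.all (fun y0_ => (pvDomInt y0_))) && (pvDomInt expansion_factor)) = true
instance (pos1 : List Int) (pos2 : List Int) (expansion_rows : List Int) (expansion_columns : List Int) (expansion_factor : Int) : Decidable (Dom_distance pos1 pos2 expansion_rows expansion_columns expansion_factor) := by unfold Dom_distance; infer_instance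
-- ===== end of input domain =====

-- B replaces A's per-coordinate range scan (membership test in the expansion list for
-- every coordinate between the points) by a single pass over each expansion list,
-- counting deduplicated entries that lie inside the interval. Faster: cost no longer
-- depends on the coordinate distance.

-- ===== PORT A =====
def distance (pos1 : List Int) (pos2 : List Int) (expansion_rows : List Int) (expansion_columns : List Int) (expansion_factor : Int) : Int :=
  let p10 := (PySem.List.pyGet? pos1 0).getD 0   -- total under Pre_ (IndexError excluded)
  let p11 := (PySem.List.pyGet? pos1 1).getD 0
  let p20 := (PySem.List.pyGet? pos2 0).getD 0
  let p21 := (PySem.List.pyGet? pos2 1).getD 0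
  let row_expansions_between : Int :=
    (((PySem.List.pyRange p10 p20 1).filter (fun x => decide (x ∈ expansion_rows))).map (fun _ => (1 : Int))).length
  let column_expansions_between : Int :=
    (((PySem.List.pyRange (min p11 p21) (max p11 p21) 1).filter (fun x => decide (x ∈ expansion_columns))).map (fun _ => (1 : Int))).length
  let expansions_between := row_expansions_between + column_expansions_between
  |p10 - p20| + |p11 - p21| + (expansion_factor - 1) * expansions_between

-- ===== PORT B =====
def distance_alt (pos1 : List Int) (pos2 : List Int) (expansion_rows : List Int) (expansion_columns : List Int) (expansion_factor : Int) : Int :=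
  let r1 := (PySem.List.pyGet? pos1 0).getD 0   -- total under Pre_ (IndexError excluded)
  let c1 := (PySem.List.pyGet? pos1 1).getD 0
  let r2 := (PySem.List.pyGet? pos2 0).getD 0
  let c2 := (PySem.List.pyGet? pos2 1).getD 0
  let rows_between : Int :=
    (PySem.Set.ofList (expansion_rows.filter (fun e => decide (r1 ≤ e) && decide (e < r2)))).length
  let lohi := if c1 ≤ c2 then (c1, c2) else (c2, c1)
  let cols_between : Int :=
    (PySem.Set.ofList (expansion_columns.filter (fun e => decide (lohi.1 ≤ e) && decide (e < lohi.2)))).length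
  |r1 - r2| + |c1 - c2| + (expansion_factor - 1) * (rows_between + cols_between)

-- ===== PRECONDITION & SPEC =====
-- Pre_ excludes exactly the inputs where A raises IndexError: a position list with
-- fewer than two entries.
def Pre_distance (pos1 : List Int) (pos2 : List Int) (expansion_rows : List Int) (expansion_columns : List Int) (expansion_factor : Int) : Prop :=
  2 ≤ pos1.length ∧ 2 ≤ pos2.length
instance (pos1 : List Int) (pos2 : List Int) (expansion_rows : List Int) (expansion_columns : List Int) (expansion_factor : Int) : Decidable (Pre_distance pos1 pos2 expansion_rows expansion_columns expansion_factor) := by unfold Pre_distance; infer_instance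
def pvWitness_distance : List Int × List Int × List Int × List Int × Int := ([1, 2], [5, -1], [2, 3], [0], 10)
def Spec_distance (pos1 : List Int) (pos2 : List Int) (expansion_rows : List Int) (expansion_columns : List Int) (expansion_factor : Int) (out : Int) : Prop := out = distance_alt pos1 pos2 expansion_rows expansion_columns expansion_factor
instance (pos1 : List Int) (pos2 : List Int) (expansion_rows : List Int) (expansion_columns : List Int) (expansion_factor : Int) (out : Int) : Decidable (Spec_distance pos1 pos2 expansion_rows expansion_columns expansion_factor out) := by unfold Spec_distance; infer_instance

-- ===== CLAIM (what is proved, stated in full; the proofs are below) =====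
def Claim_equal_distance : Prop := ∀ (pos1 : List Int) (pos2 : List Int) (expansion_rows : List Int) (expansion_columns : List Int) (expansion_factor : Int), Dom_distance pos1 pos2 expansion_rows expansion_columns expansion_factor → Pre_distance pos1 pos2 expansion_rows expansion_columns expansion_factor → Spec_distance pos1 pos2 expansion_rows expansion_columns expansion_factor (distance pos1 pos2 expansion_rows expansion_columns expansion_factor)

-- ===== LEMMAS AND PROOFS =====

-- The two counting strategies agree: scanning the integer interval [lo, hi) for
-- members of `es` counts the same objects as deduplicating the members of `es`
-- that lie in [lo, hi) — both lists are Nodup with the same membership predicate.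
theorem count_range_eq_count_set (lo hi : Int) (es : List Int) :
    ((PySem.List.pyRange lo hi 1).filter (fun x => decide (x ∈ es))).length
      = (PySem.Set.ofList (es.filter (fun e => decide (lo ≤ e) && decide (e < hi)))).length := by
  apply List.Perm.length_eq
  apply (List.perm_ext_iff_of_nodup ?_ ?_).2
  · intro x
    simp [PySem.Set.mem_ofList, List.mem_filter, PySem.List.mem_pyRange_one]
    tauto
  · exact (PySem.List.nodup_pyRange_one lo hi).filter _
  · exact PySem.Set.nodup_ofList _

-- ===== VERDICT (by name: the statement is the Claim_ definition above) =====
theorem distance_spec : Claim_equal_distance := by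
  intro pos1 pos2 er ec ef _ _
  unfold Spec_distance distance distance_alt
  simp only [List.length_map, count_range_eq_count_set]
  split_ifs with h
  · simp [min_eq_left h, max_eq_right h]
  · have h' : (PySem.List.pyGet? pos2 1).getD 0 ≤ (PySem.List.pyGet? pos1 1).getD 0 := le_of_not_ge h
    simp [min_eq_right h', max_eq_left h']
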